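-- pv_equiv track=rewrite | github.com/Tunahaha/python | CS 61A/cats/cats.py | hidden_kittens
-- ===== SOURCE A (Python) =====
-- def hidden_kittens(typed, reference, limit):
--     """A diff function that returns the number of times REFERENCE appears as a
--     (potentially non-continuous) substring of TYPED. If REFERENCE appears 0 or > LIMIT times
--     within TYPED, return a number greater than LIMIT.
--
--     Arguments:
--         typed: a starting word
--         reference: a string representing a desired goal word
--         limit: a number representing an upper bound on the number of substrings found
--
--     >>> limit = 5
--     >>> hidden_kittens("ccatgts", "cats", limit)
--     4
--     # 123 appears 10 times in 123123123
--     >>> hidden_kittens("123123123", "123", limit) > limit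
--     True
--     # hidden appears 0 times in hiddnehddi
--     >>> hidden_kittens("hiddnehddi", "hidden", limit) > limit
--     True
--     """
--     # BEGIN PROBLEM 7
--     "*** YOUR CODE HERE ***"
--     limits = limit
--     if limits < 0:
--         return 1
--     elif len(typed) == 0:
--         return 0
--     elif len(typed) == 1 and len(reference) == 1 and (typed[0] != reference[0]):
--         return 1
--     elif len(reference) == 1 and (typed[0] == reference[0]):
--         limits -= 1
--         return 1+hidden_kittens(typed[1:], reference, limits)
--     elif typed[0] == reference[0]:
--         return hidden_kittens(typed[1:], reference[1:], limits)+hidden_kittens(typed[1:], reference, limits)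
--     else:
--         return hidden_kittens(typed[1:], reference, limits)
-- ===== SOURCE B (Python) =====
-- def hidden_kittens(typed, reference, limit):
--     """Memoized version of the count: one cached value per (typed index,
--     reference index, remaining limit) state, so each state is computed once."""
--     n, m = len(typed), len(reference)
--     memo = {}
--
--     def count(i, j, l):
--         if l < 0:
--             return 1
--         key = (i, j, l)
--         if key in memo:
--             return memo[key]
--         if i == n:
--             res = 0
--         elif i == n - 1 and j == m - 1 and typed[i] != reference[j]:
--             res = 1
--         elif j == m - 1 and typed[i] == reference[j]:
--             res = 1 + count(i + 1, j, l - 1)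
--         elif typed[i] == reference[j]:
--             res = count(i + 1, j + 1, l) + count(i + 1, j, l)
--         else:
--             res = count(i + 1, j, l)
--         memo[key] = res
--         return res
--
--     return count(0, 0, limit)
-- ===== Notes on version B (the rewrite author's own statement) =====
-- stated objective: faster
-- what changed: Replaced A's exponential branching recursion on string slices by a memoized recursion on index triples (typed index, reference index, remaining limit), computing each state once; Pre_ excludes only the inputs (nonempty typed, empty reference, limit >= 0) on which both A and B raise IndexError.
import Mathlib
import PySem

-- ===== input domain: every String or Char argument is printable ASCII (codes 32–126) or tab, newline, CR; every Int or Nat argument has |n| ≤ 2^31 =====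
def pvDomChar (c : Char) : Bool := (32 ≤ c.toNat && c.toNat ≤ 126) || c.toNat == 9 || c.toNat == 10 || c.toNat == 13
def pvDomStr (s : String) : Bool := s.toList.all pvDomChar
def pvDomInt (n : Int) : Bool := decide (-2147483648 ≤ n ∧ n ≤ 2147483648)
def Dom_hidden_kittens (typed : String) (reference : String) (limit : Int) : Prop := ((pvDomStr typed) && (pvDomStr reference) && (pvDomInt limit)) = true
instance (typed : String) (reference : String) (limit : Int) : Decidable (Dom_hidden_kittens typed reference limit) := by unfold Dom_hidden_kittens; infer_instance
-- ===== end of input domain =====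

-- B memoizes the recursion on (typed index, reference index, remaining limit),
-- computing each state once instead of A's exponential re-exploration.

-- ===== PORT A =====
-- literal transliteration of A's recursion; where Python raises IndexError
-- (reference empty with typed nonempty and limit ≥ 0, excluded by Pre_) it returns 0
def hkA (t r : List Char) (l : Int) : Int :=
  if l < 0 then 1
  else
    match t, r with
    | [], _ => 0
    | _ :: _, [] => 0       -- Python raises IndexError here (outside Pre_)
    | c :: t', d :: r' =>
      if t' = [] ∧ r' = [] ∧ c ≠ d then 1
      else if r' = [] ∧ c = d then 1 + hkA t' (d :: r') (l - 1)
      else if c = d then hkA t' r' l + hkA t' (d :: r') l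
      else hkA t' (d :: r') l
termination_by t.length
decreasing_by all_goals simp

def hidden_kittens (typed : String) (reference : String) (limit : Int) : Int :=
  hkA typed.toList reference.toList limit

-- ===== PORT B =====
-- Source B's inner `count(i, j, l)` with the memo dict threaded through explicitly;
-- `memo[key] = res` is the .insert on each returned pair.  `typed[i]`/`reference[j]`
-- are accessed by Python only under the guards that make them in range (indices are
-- Nat here, so List.getD is exact there); the first guard is the ≤ form of `i == n`,
-- identical on every reachable state since i only grows by 1 from 0.
def countB (t r : List Char) (i j : Nat) (l : Int)
    (memo : PySem.Dict (Nat × Nat × Int) Int) : Int × PySem.Dict (Nat × Nat × Int) Int :=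
  if l < 0 then (1, memo)
  else
    match memo.get? (i, j, l) with
    | some v => (v, memo)
    | none =>
      if t.length ≤ i then (0, memo.insert (i, j, l) 0)
      else if (i : Int) = (t.length : Int) - 1 ∧ (j : Int) = (r.length : Int) - 1
              ∧ t.getD i ' ' ≠ r.getD j ' ' then
        (1, memo.insert (i, j, l) 1)
      else if (j : Int) = (r.length : Int) - 1 ∧ t.getD i ' ' = r.getD j ' ' then
        let p := countB t r (i + 1) j (l - 1) memo
        (1 + p.1, p.2.insert (i, j, l) (1 + p.1))
      else if t.getD i ' ' = r.getD j ' ' then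
        let p := countB t r (i + 1) (j + 1) l memo
        let q := countB t r (i + 1) j l p.2
        (p.1 + q.1, q.2.insert (i, j, l) (p.1 + q.1))
      else
        let p := countB t r (i + 1) j l memo
        (p.1, p.2.insert (i, j, l) p.1)
termination_by t.length - i
decreasing_by all_goals omega

def hidden_kittens_alt (typed : String) (reference : String) (limit : Int) : Int :=
  (countB typed.toList reference.toList 0 0 limit PySem.Dict.empty).1

-- ===== PRECONDITION & SPEC =====
-- Pre_ excludes exactly the inputs where A raises IndexError (empty reference with
-- nonempty typed and limit ≥ 0); B raises IndexError there too.
def Pre_hidden_kittens (typed : String) (reference : String) (limit : Int) : Prop :=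
  limit < 0 ∨ typed = "" ∨ reference ≠ ""
instance (typed : String) (reference : String) (limit : Int) : Decidable (Pre_hidden_kittens typed reference limit) := by unfold Pre_hidden_kittens; infer_instance

def pvWitness_hidden_kittens : String × String × Int := ("ccatgts", "cats", 5)

def Spec_hidden_kittens (typed : String) (reference : String) (limit : Int) (out : Int) : Prop := out = hidden_kittens_alt typed reference limit
instance (typed : String) (reference : String) (limit : Int) (out : Int) : Decidable (Spec_hidden_kittens typed reference limit out) := by unfold Spec_hidden_kittens; infer_instance

-- ===== CLAIM =====
def Claim_equal_hidden_kittens : Prop := ∀ (typed : String) (reference : String) (limit : Int), Dom_hidden_kittens typed reference limit → Pre_hidden_kittens typed reference limit → Spec_hidden_kittens typed reference limit (hidden_kittens typed reference limit)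

-- ===== LEMMAS AND PROOFS =====

-- the memo invariant: every stored value is the A-value of its state
def MemoOK (t r : List Char) (memo : PySem.Dict (Nat × Nat × Int) Int) : Prop :=
  ∀ a b c v, memo.get? (a, b, c) = some v → v = hkA (t.drop a) (r.drop b) c

lemma memoOK_insert {t r : List Char} {memo : PySem.Dict (Nat × Nat × Int) Int}
    (hinv : MemoOK t r memo) {i j : Nat} {l w : Int}
    (hw : w = hkA (t.drop i) (r.drop j) l) :
    MemoOK t r (memo.insert (i, j, l) w) := by
  intro a b c v hv
  rw [PySem.Dict.get?_insert] at hv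
  split_ifs at hv with h
  · simp only [Prod.mk.injEq] at h
    obtain ⟨rfl, rfl, rfl⟩ := h
    cases hv
    exact hw
  · exact hinv a b c v hv

lemma countB_spec (t r : List Char) :
    ∀ (n i j : Nat) (l : Int) (memo : PySem.Dict (Nat × Nat × Int) Int),
      t.length - i ≤ n → j < r.length → MemoOK t r memo →
      (countB t r i j l memo).1 = hkA (t.drop i) (r.drop j) l ∧
      MemoOK t r (countB t r i j l memo).2 := by
  intro n
  induction n with
  | zero =>
    intro i j l memo hn hj hinv
    have hi : t.length ≤ i := by omega
    rw [countB]
    by_cases hl : l < 0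
    · rw [if_pos hl]
      refine ⟨?_, hinv⟩
      rw [hkA.eq_def]
      simp [hl]
    · rw [if_neg hl]
      cases hmk : memo.get? (i, j, l) with
      | some v => exact ⟨hinv i j l v hmk, hinv⟩
      | none =>
        have hdrop : t.drop i = [] := List.drop_eq_nil_of_le hi
        have hval : (0 : Int) = hkA (t.drop i) (r.drop j) l := by
          rw [hdrop, hkA.eq_def]; simp [hl]
        rw [if_pos hi]
        exact ⟨hval, memoOK_insert hinv hval⟩
  | succ n ih =>
    intro i j l memo hn hj hinv
    rw [countB]
    by_cases hl : l < 0
    · rw [if_pos hl]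
      refine ⟨?_, hinv⟩
      rw [hkA.eq_def]
      simp [hl]
    · rw [if_neg hl]
      cases hmk : memo.get? (i, j, l) with
      | some v => exact ⟨hinv i j l v hmk, hinv⟩
      | none =>
        by_cases hi : t.length ≤ i
        · have hdrop : t.drop i = [] := List.drop_eq_nil_of_le hi
          have hval : (0 : Int) = hkA (t.drop i) (r.drop j) l := by
            rw [hdrop, hkA.eq_def]; simp [hl]
          rw [if_pos hi]
          exact ⟨hval, memoOK_insert hinv hval⟩
        · rw [if_neg hi]
          have hi' : i < t.length := by omega
          have hct : t.getD i ' ' = t[i] := List.getD_eq_getElem t ' ' hi'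
          have hcr : r.getD j ' ' = r[j] := List.getD_eq_getElem r ' ' hj
          have hdt : t.drop i = t[i] :: t.drop (i + 1) := List.drop_eq_getElem_cons hi'
          have hdr : r.drop j = r[j] :: r.drop (j + 1) := List.drop_eq_getElem_cons hj
          have htlast : ((i : Int) = (t.length : Int) - 1) ↔ t.drop (i + 1) = [] := by
            rw [List.drop_eq_nil_iff]; omega
          have hrlast : ((j : Int) = (r.length : Int) - 1) ↔ r.drop (j + 1) = [] := by
            rw [List.drop_eq_nil_iff]; omega
          have hkA_eq : hkA (t.drop i) (r.drop j) l =
              if t.drop (i + 1) = [] ∧ r.drop (j + 1) = [] ∧ t[i] ≠ r[j] then 1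
              else if r.drop (j + 1) = [] ∧ t[i] = r[j] then
                1 + hkA (t.drop (i + 1)) (r.drop j) (l - 1)
              else if t[i] = r[j] then
                hkA (t.drop (i + 1)) (r.drop (j + 1)) l + hkA (t.drop (i + 1)) (r.drop j) l
              else hkA (t.drop (i + 1)) (r.drop j) l := by
            conv_lhs => rw [hdt, hdr, hkA]
            rw [if_neg hl]
            rw [← hdr]
          have hn' : t.length - (i + 1) ≤ n := by omega
          by_cases h2 : (i : Int) = (t.length : Int) - 1 ∧ (j : Int) = (r.length : Int) - 1
              ∧ t.getD i ' ' ≠ r.getD j ' '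
          · rw [if_pos h2]
            have hval : (1 : Int) = hkA (t.drop i) (r.drop j) l := by
              rw [hkA_eq, if_pos ⟨htlast.mp h2.1, hrlast.mp h2.2.1, by
                rw [← hct, ← hcr]; exact h2.2.2⟩]
            exact ⟨hval, memoOK_insert hinv hval⟩
          · rw [if_neg h2]
            by_cases h3 : (j : Int) = (r.length : Int) - 1 ∧ t.getD i ' ' = r.getD j ' '
            · rw [if_pos h3]
              obtain ⟨hp, hpm⟩ := ih (i + 1) j (l - 1) memo hn' hj hinv
              have hval : 1 + (countB t r (i + 1) j (l - 1) memo).1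
                  = hkA (t.drop i) (r.drop j) l := by
                rw [hkA_eq, if_neg, if_pos ⟨hrlast.mp h3.1, by rw [← hct, ← hcr]; exact h3.2⟩, hp]
                intro ⟨ha, hb, hc⟩
                exact h2 ⟨htlast.mpr ha, hrlast.mpr hb, by rw [hct, hcr]; exact hc⟩
              exact ⟨hval, memoOK_insert hpm hval⟩
            · rw [if_neg h3]
              by_cases h4 : t.getD i ' ' = r.getD j ' '
              · rw [if_pos h4]
                have hceq : t[i] = r[j] := by rw [← hct, ← hcr]; exact h4
                have hjlast : ¬ ((j : Int) = (r.length : Int) - 1) := fun h => h3 ⟨h, h4⟩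
                have hj' : j + 1 < r.length := by omega
                obtain ⟨hp, hpm⟩ := ih (i + 1) (j + 1) l memo hn' hj' hinv
                obtain ⟨hq, hqm⟩ := ih (i + 1) j l _ hn' hj hpm
                have hval : (countB t r (i + 1) (j + 1) l memo).1 +
                    (countB t r (i + 1) j l (countB t r (i + 1) (j + 1) l memo).2).1
                    = hkA (t.drop i) (r.drop j) l := by
                  rw [hkA_eq, if_neg, if_neg, if_pos hceq, hp, hq]
                  · intro ⟨hb, _⟩; exact hjlast (hrlast.mpr hb)
                  · intro ⟨_, hb, _⟩; exact hjlast (hrlast.mpr hb)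
                exact ⟨hval, memoOK_insert hqm hval⟩
              · rw [if_neg h4]
                have hcne : t[i] ≠ r[j] := by rw [← hct, ← hcr]; exact h4
                obtain ⟨hp, hpm⟩ := ih (i + 1) j l memo hn' hj hinv
                have hval : (countB t r (i + 1) j l memo).1
                    = hkA (t.drop i) (r.drop j) l := by
                  rw [hkA_eq, if_neg, if_neg, if_neg hcne, hp]
                  · intro ⟨_, hb⟩
                    exact hcne hb
                  · intro ⟨ha, hb, hc⟩
                    exact h2 ⟨htlast.mpr ha, hrlast.mpr hb, by rw [hct, hcr]; exact hc⟩
                exact ⟨hval, memoOK_insert hpm hval⟩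

-- ===== VERDICT =====
theorem hidden_kittens_spec : Claim_equal_hidden_kittens := by
  intro typed reference limit _ hpre
  show hidden_kittens typed reference limit = hidden_kittens_alt typed reference limit
  unfold hidden_kittens hidden_kittens_alt
  by_cases hlim : limit < 0
  · rw [hkA.eq_def, countB]
    simp [hlim]
  · by_cases ht : typed.toList = []
    · rw [ht, hkA.eq_def, countB]
      simp [hlim, PySem.Dict.get?_empty]
    · have hrnil : reference.toList ≠ [] := by
        rcases hpre with h | h | h
        · omega
        · exact absurd (by simp [h]) ht
        · intro he
          exact h (String.toList_injective (by simp [he]))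
      have hempty : MemoOK typed.toList reference.toList PySem.Dict.empty := by
        intro a b c v hv
        rw [PySem.Dict.get?_empty] at hv
        cases hv
      have := (countB_spec typed.toList reference.toList typed.toList.length 0 0
        limit PySem.Dict.empty (by omega) (List.length_pos_of_ne_nil hrnil) hempty).1
      simpa using this.symm
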